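-- pv_equiv track=rewrite | github.com/marcosrlemos1/Counter_Point | main.py | format_coordinate
-- ===== SOURCE A (Python) =====
-- def format_coordinate(coordinate):
--     integer_part, decimal_part = coordinate.split('.')
--
--     formatted_integer_part = ""
--     for i in range(len(integer_part)):
--         formatted_integer_part += integer_part[i]
--         if (len(integer_part) - i - 1) % 3 == 0 and i != len(integer_part) - 1:
--             formatted_integer_part += '.'
--
--     formatted_decimal_part = ""
--     for i in range(len(decimal_part)):
--         formatted_decimal_part += decimal_part[i]
--         if (i + 1) % 3 == 0 and i != len(decimal_part) - 1:
--             formatted_decimal_part += '.'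
--
--     return f'{formatted_integer_part}.{formatted_decimal_part}'
-- ===== SOURCE B (Python) =====
-- def format_coordinate(coordinate):
--     integer_part, decimal_part = coordinate.split('.')
--     chunks = []
--     r = len(integer_part) % 3
--     if r:
--         chunks.append(integer_part[:r])
--     while r < len(integer_part):
--         chunks.append(integer_part[r:r+3])
--         r += 3
--     dec_chunks = []
--     j = 0
--     while j < len(decimal_part):
--         dec_chunks.append(decimal_part[j:j+3])
--         j += 3
--     return '.'.join(chunks) + '.' + '.'.join(dec_chunks)
-- ===== Notes on version B (the rewrite author's own statement) =====
-- stated objective: simpler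
-- what changed: Replaces A's per-character loops with modular-position dot tests by slicing each part into fixed 3-char chunks (with a len%3 leading chunk for the integer part) and dot-joining the chunks.
import Mathlib
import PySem

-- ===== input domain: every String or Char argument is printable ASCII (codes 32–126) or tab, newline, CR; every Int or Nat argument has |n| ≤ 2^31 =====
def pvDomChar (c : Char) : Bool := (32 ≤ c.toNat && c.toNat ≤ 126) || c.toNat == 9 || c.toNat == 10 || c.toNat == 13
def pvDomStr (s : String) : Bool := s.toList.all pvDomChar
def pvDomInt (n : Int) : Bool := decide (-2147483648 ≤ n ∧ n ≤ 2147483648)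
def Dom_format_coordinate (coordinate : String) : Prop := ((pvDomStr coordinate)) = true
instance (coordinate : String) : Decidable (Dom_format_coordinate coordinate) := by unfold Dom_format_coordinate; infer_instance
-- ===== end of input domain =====

-- B replaces A's per-character modular-condition loops by 3-char chunking plus '.'-join (objective: simpler).

-- ===== PORT A =====
-- for i in range(len(integer_part)): append char; dot when (len-i-1)%3==0 and i != len-1
def pvFmtIntA (rest : List Char) (i n : Nat) : List Char :=
  match rest with
  | [] => []
  | c :: tl =>
      (c :: (if (n - i - 1) % 3 == 0 && i != n - 1 then ['.'] else [])) ++ pvFmtIntA tl (i+1) n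

-- for i in range(len(decimal_part)): append char; dot when (i+1)%3==0 and i != len-1
def pvFmtDecA (rest : List Char) (i n : Nat) : List Char :=
  match rest with
  | [] => []
  | c :: tl =>
      (c :: (if (i + 1) % 3 == 0 && i != n - 1 then ['.'] else [])) ++ pvFmtDecA tl (i+1) n

def format_coordinate (coordinate : String) : String :=
  match PySem.Chars.splitOn coordinate.toList ['.'] with
  | [ip, dp] =>
      String.ofList (pvFmtIntA ip 0 ip.length ++ '.' :: pvFmtDecA dp 0 dp.length)
  | _ => ""    -- unpacking raises ValueError in Python; excluded by Pre_

-- ===== PORT B =====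
-- while r < len(part): chunks.append(part[r:r+3]); r += 3
def pvChunksFrom (s : List Char) (j : Nat) : List (List Char) :=
  if j < s.length then
    PySem.List.slice s (some (j : Int)) (some ((j : Int) + 3)) :: pvChunksFrom s (j + 3)
  else []
termination_by s.length - j

def format_coordinate_alt (coordinate : String) : String :=
  match PySem.Chars.splitOn coordinate.toList ['.'] with
  | [] => ""    -- unpacking raises ValueError in Python; excluded by Pre_
  | [_] => ""
  | _ :: _ :: _ :: _ => ""
  | [ip, dp] =>
      let r := ip.length % 3
      let chunks :=
        (if r ≠ 0 then [PySem.List.slice ip none (some (r : Int))] else []) ++ pvChunksFrom ip r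
      let decChunks := pvChunksFrom dp 0
      String.ofList (PySem.Chars.join ['.'] chunks ++ '.' :: PySem.Chars.join ['.'] decChunks)

-- ===== PRECONDITION & SPEC =====
-- Pre_ excludes strings whose number of dot characters is not exactly one: there Python's two-variable unpacking of the split raises ValueError.
def Pre_format_coordinate (coordinate : String) : Prop :=
  coordinate.toList.count '.' = 1
instance (coordinate : String) : Decidable (Pre_format_coordinate coordinate) := by
  unfold Pre_format_coordinate; infer_instance

def pvWitness_format_coordinate : String := "1234567.8901"

def Spec_format_coordinate (coordinate : String) (out : String) : Prop := out = format_coordinate_alt coordinate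
instance (coordinate : String) (out : String) : Decidable (Spec_format_coordinate coordinate out) := by unfold Spec_format_coordinate; infer_instance

-- ===== CLAIM (what is proved, stated in full; the proofs are below) =====
def Claim_equal_format_coordinate : Prop := ∀ (coordinate : String), Dom_format_coordinate coordinate → Pre_format_coordinate coordinate → Spec_format_coordinate coordinate (format_coordinate coordinate)

-- ===== LEMMAS AND PROOFS =====

-- proof-only spec: the list of 3-char chunks of s, left to right
def pvChunks3 : List Char → List (List Char)
  | [] => []
  | [a] => [[a]]
  | [a, b] => [[a, b]]
  | a :: b :: c :: tl => [a, b, c] :: pvChunks3 tl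

theorem pvChunks3_ne_nil {s : List Char} (h : s ≠ []) : pvChunks3 s ≠ [] := by
  match s with
  | [] => exact absurd rfl h
  | [a] => simp [pvChunks3]
  | [a, b] => simp [pvChunks3]
  | a :: b :: c :: tl => simp [pvChunks3]

theorem pvChunks3_cons {s : List Char} (h : s ≠ []) :
    pvChunks3 s = s.take 3 :: pvChunks3 (s.drop 3) := by
  match s with
  | [] => exact absurd rfl h
  | [a] => simp [pvChunks3]
  | [a, b] => simp [pvChunks3]
  | a :: b :: c :: tl => simp [pvChunks3]

theorem pvJd_cons (x : List Char) {l : List (List Char)} (h : l ≠ []) :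
    PySem.Chars.join ['.'] (x :: l) = x ++ '.' :: PySem.Chars.join ['.'] l := by
  cases l with
  | nil => exact absurd rfl h
  | cons y tl => simp [PySem.Chars.join_cons_cons]

-- controlled one-step unfoldings (all rfl)
theorem pvFmtDecA_nil (i n : Nat) : pvFmtDecA [] i n = [] := rfl
theorem pvFmtDecA_cons (c : Char) (tl : List Char) (i n : Nat) :
    pvFmtDecA (c :: tl) i n =
      (c :: (if (i + 1) % 3 == 0 && i != n - 1 then ['.'] else [])) ++ pvFmtDecA tl (i + 1) n := rfl
theorem pvFmtIntA_cons (c : Char) (tl : List Char) (i n : Nat) :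
    pvFmtIntA (c :: tl) i n =
      (c :: (if (n - i - 1) % 3 == 0 && i != n - 1 then ['.'] else [])) ++ pvFmtIntA tl (i + 1) n := rfl

theorem pvChunksFrom_eq (s : List Char) (j : Nat) :
    pvChunksFrom s j = pvChunks3 (s.drop j) := by
  rw [pvChunksFrom]
  by_cases h : j < s.length
  · have h3 : ((j : Int) + 3) = ((j : Int) + ((3 : Nat) : Int)) := by norm_num
    have hd : s.drop j ≠ [] := by
      intro hnil
      have : (s.drop j).length = 0 := by rw [hnil]; rfl
      simp at this; omega
    rw [if_pos h, h3, PySem.List.slice_natCast_add, pvChunksFrom_eq s (j + 3),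
      pvChunks3_cons hd, List.drop_drop]
  · rw [if_neg h]
    have : s.drop j = [] := List.drop_eq_nil_of_le (by omega)
    rw [this]
    rfl
termination_by s.length - j

-- A's decimal loop equals the join of the 3-chunks, for i ≡ 0 (mod 3), n = i + length
theorem pvFmtDecA_eq : ∀ (s : List Char) (i n : Nat), n = i + s.length → i % 3 = 0 →
    pvFmtDecA s i n = PySem.Chars.join ['.'] (pvChunks3 s)
  | [], i, n, _, _ => by simp [pvFmtDecA_nil, pvChunks3, PySem.Chars.join_nil]
  | [a], i, n, hn, h3 => by
    have hn' : n = i + 1 := by simpa using hn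
    have hl : (i != n - 1) = false := by simp; omega
    rw [pvFmtDecA_cons, pvFmtDecA_nil]
    simp [hl, pvChunks3, PySem.Chars.join_singleton]
  | [a, b], i, n, hn, h3 => by
    have hn' : n = i + 2 := by simpa using hn
    have h1 : ((i + 1) % 3 == 0) = false := by simp; omega
    have hl : (i + 1 != n - 1) = false := by simp; omega
    rw [pvFmtDecA_cons, pvFmtDecA_cons, pvFmtDecA_nil]
    simp [h1, hl, pvChunks3, PySem.Chars.join_singleton]
  | a :: b :: c :: tl, i, n, hn, h3 => by
    have hn' : n = i + 3 + tl.length := by simp at hn; omega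
    have hc1 : ((i + 1) % 3 == 0) = false := by simp; omega
    have hc2 : ((i + 1 + 1) % 3 == 0) = false := by simp; omega
    rw [pvFmtDecA_cons, pvFmtDecA_cons, pvFmtDecA_cons]
    cases tl with
    | nil =>
      have hlast : (i + 1 + 1 != n - 1) = false := by simp at hn' ⊢; omega
      rw [pvFmtDecA_nil]
      simp [hc1, hc2, hlast, pvChunks3, PySem.Chars.join_singleton]
    | cons d tl' =>
      have hc3 : ((i + 1 + 1 + 1) % 3 == 0) = true := by simp; omega
      have hlast : (i + 1 + 1 != n - 1) = true := by simp at hn' ⊢; omega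
      have ih := pvFmtDecA_eq (d :: tl') (i + 1 + 1 + 1) n
        (by simp at hn' ⊢; omega) (by omega)
      rw [ih, show pvChunks3 (a :: b :: c :: d :: tl') = [a, b, c] :: pvChunks3 (d :: tl') from rfl,
        pvJd_cons _ (pvChunks3_ne_nil (by simp))]
      simp [hc1, hc2, hc3, hlast]
termination_by s => s.length

-- proof-only restatement of A's integer loop without the index
def pvIntS : List Char → List Char
  | [] => []
  | c :: tl => (c :: (if tl.length % 3 = 0 ∧ tl ≠ [] then ['.'] else [])) ++ pvIntS tl

theorem pvIntS_nil : pvIntS [] = [] := rfl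
theorem pvIntS_cons (c : Char) (tl : List Char) :
    pvIntS (c :: tl) = (c :: (if tl.length % 3 = 0 ∧ tl ≠ [] then ['.'] else [])) ++ pvIntS tl := rfl

theorem pvFmtIntA_eq (s : List Char) : ∀ (i n : Nat), n = i + s.length →
    pvFmtIntA s i n = pvIntS s := by
  induction s with
  | nil => intro i n _; rfl
  | cons c tl ih =>
    intro i n hn
    have hn' : n = i + 1 + tl.length := by simp at hn; omega
    have hcond : ((n - i - 1) % 3 == 0 && i != n - 1) = decide (tl.length % 3 = 0 ∧ tl ≠ []) := by
      have h1 : n - i - 1 = tl.length := by omega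
      have h2 : (i != n - 1) = decide (tl ≠ []) := by
        rcases tl with _ | ⟨d, tl'⟩ <;> simp at hn' ⊢ <;> omega
      rw [h1, h2]
      by_cases h : tl.length % 3 = 0 <;> by_cases h' : tl ≠ [] <;> simp [h, h']
    rw [pvFmtIntA_cons, pvIntS_cons, hcond, ih (i + 1) n (by omega)]
    by_cases h : tl.length % 3 = 0 ∧ tl ≠ [] <;> simp [h]

theorem pvIntS_mod0 : ∀ (s : List Char), s.length % 3 = 0 →
    pvIntS s = PySem.Chars.join ['.'] (pvChunks3 s)
  | [], _ => by simp [pvIntS_nil, pvChunks3, PySem.Chars.join_nil]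
  | [a], h => by simp at h
  | [a, b], h => by simp at h
  | a :: b :: c :: tl, h => by
    have htl : tl.length % 3 = 0 := by simp at h; omega
    have hc1 : ¬((b :: c :: tl).length % 3 = 0 ∧ b :: c :: tl ≠ []) := by simp; omega
    have hc2 : ¬((c :: tl).length % 3 = 0 ∧ c :: tl ≠ []) := by simp; omega
    rw [pvIntS_cons, pvIntS_cons, pvIntS_cons]
    cases tl with
    | nil =>
      simp [pvIntS_nil, pvChunks3, PySem.Chars.join_singleton]
    | cons d tl' =>
      have hlen : tl'.length % 3 = 2 := by simp at htl; omega
      have e1 : (tl'.length + 1 + 1 + 1) % 3 ≠ 0 := by omega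
      have e2 : (tl'.length + 1 + 1) % 3 ≠ 0 := by omega
      have e3 : (tl'.length + 1) % 3 = 0 := by omega
      have ih := pvIntS_mod0 (d :: tl') htl
      rw [ih, show pvChunks3 (a :: b :: c :: d :: tl') = [a, b, c] :: pvChunks3 (d :: tl') from rfl,
        pvJd_cons _ (pvChunks3_ne_nil (by simp))]
      simp [e1, e2, e3]
termination_by s => s.length

theorem pvIntS_eq (s : List Char) :
    pvIntS s = PySem.Chars.join ['.']
      ((if s.length % 3 ≠ 0 then [s.take (s.length % 3)] else []) ++
        pvChunks3 (s.drop (s.length % 3))) := by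
  by_cases h0 : s.length % 3 = 0
  · simp [h0, pvIntS_mod0 s h0]
  · have h12 : s.length % 3 = 1 ∨ s.length % 3 = 2 := by omega
    rcases h12 with h1 | h2
    · obtain ⟨c, tl, rfl⟩ := List.exists_cons_of_ne_nil (l := s) (by rintro rfl; simp at h1)
      have htl : tl.length % 3 = 0 := by simp at h1; omega
      rw [h1, pvIntS_cons]
      cases tl with
      | nil => simp [pvIntS_nil, pvChunks3, PySem.Chars.join_singleton]
      | cons d tl' =>
        have e : (tl'.length + 1) % 3 = 0 := by simp at htl; omega
        rw [pvIntS_mod0 (d :: tl') htl]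
        have hfold : (if (1 : Nat) ≠ 0 then [List.take 1 (c :: d :: tl')] else []) ++
            pvChunks3 (List.drop 1 (c :: d :: tl')) =
            List.take 1 (c :: d :: tl') :: pvChunks3 (d :: tl') := by simp
        rw [hfold, pvJd_cons _ (pvChunks3_ne_nil (by simp))]
        simp [e]
    · obtain ⟨a, tl0, rfl⟩ := List.exists_cons_of_ne_nil (l := s) (by rintro rfl; simp at h2)
      obtain ⟨b, tl, rfl⟩ := List.exists_cons_of_ne_nil (l := tl0) (by rintro rfl; simp at h2)
      have htl : tl.length % 3 = 0 := by simp at h2; omega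
      have hc1 : ¬((b :: tl).length % 3 = 0 ∧ b :: tl ≠ []) := by simp; omega
      rw [h2, pvIntS_cons, pvIntS_cons]
      cases tl with
      | nil => simp [pvIntS_nil, pvChunks3, PySem.Chars.join_singleton]
      | cons d tl' =>
        have hlen : tl'.length % 3 = 2 := by simp at htl; omega
        have e1 : (tl'.length + 1 + 1) % 3 ≠ 0 := by omega
        have e2 : (tl'.length + 1) % 3 = 0 := by omega
        rw [pvIntS_mod0 (d :: tl') htl]
        have hfold : (if (2 : Nat) ≠ 0 then [List.take 2 (a :: b :: d :: tl')] else []) ++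
            pvChunks3 (List.drop 2 (a :: b :: d :: tl')) =
            List.take 2 (a :: b :: d :: tl') :: pvChunks3 (d :: tl') := by simp
        rw [hfold, pvJd_cons _ (pvChunks3_ne_nil (by simp))]
        simp [e1, e2]

-- ===== VERDICT (by name: the statement is the Claim_ definition above) =====
theorem format_coordinate_spec : Claim_equal_format_coordinate := by
  intro coordinate _ _
  unfold Spec_format_coordinate format_coordinate format_coordinate_alt
  cases hsp : PySem.Chars.splitOn coordinate.toList ['.'] with
  | nil => rfl
  | cons p rest =>
    cases rest with
    | nil => rfl
    | cons q rest' =>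
      cases rest' with
      | nil =>
        show String.ofList (pvFmtIntA p 0 p.length ++ '.' :: pvFmtDecA q 0 q.length) =
          String.ofList (PySem.Chars.join ['.']
              ((if p.length % 3 ≠ 0 then
                  [PySem.List.slice p none (some ((p.length % 3 : Nat) : Int))] else []) ++
                pvChunksFrom p (p.length % 3)) ++
            '.' :: PySem.Chars.join ['.'] (pvChunksFrom q 0))
        congr 1
        rw [pvFmtIntA_eq p 0 p.length (by simp), pvIntS_eq p,
          pvFmtDecA_eq q 0 q.length (by simp) (by simp),
          pvChunksFrom_eq p (p.length % 3), pvChunksFrom_eq q 0,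
          PySem.List.slice_to_natCast, List.drop_zero]
      | cons => rfl
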